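-- pv_equiv track=rewrite | github.com/fflorey/advent_of_code_2023 | 7/7a.py | find_four_same_cards
-- ===== SOURCE A (Python) =====
-- def find_four_same_cards(cards):
--     result = []
--     for card in cards:
--         counts = {}
--         for char in card:
--             counts[char] = counts.get(char, 0) + 1
--         if 4 in counts.values():
--             result.append(card)
--     return result
-- ===== SOURCE B (Python) =====
-- def run_lengths(s):
--     lens = []
--     while s:
--         c = s[0]
--         n = 0
--         while n < len(s) and s[n] == c:
--             n += 1
--         lens.append(n)
--         s = s[n:]
--     return lens
--
--
-- def find_four_same_cards(cards):
--     return [card for card in cards if 4 in run_lengths(sorted(card))]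
-- ===== Notes on version B (the rewrite author's own statement) =====
-- stated objective: alternative
-- what changed: Instead of building a per-card character-frequency dict and testing its values, B sorts each card and scans the sorted characters once, collecting maximal run lengths, keeping the card iff some run has length exactly 4 (sort-then-group vs counting).
import Mathlib
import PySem

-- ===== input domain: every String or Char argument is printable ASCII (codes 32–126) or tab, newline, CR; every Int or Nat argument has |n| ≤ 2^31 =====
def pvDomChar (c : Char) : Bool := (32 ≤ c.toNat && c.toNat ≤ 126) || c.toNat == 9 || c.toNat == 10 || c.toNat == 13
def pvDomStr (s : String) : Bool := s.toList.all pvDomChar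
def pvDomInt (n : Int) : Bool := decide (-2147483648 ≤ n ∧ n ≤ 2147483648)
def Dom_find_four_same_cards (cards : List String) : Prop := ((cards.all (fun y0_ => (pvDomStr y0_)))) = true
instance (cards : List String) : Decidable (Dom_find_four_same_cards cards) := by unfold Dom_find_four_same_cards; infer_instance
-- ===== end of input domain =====

-- B sorts each card and scans maximal run lengths, keeping a card iff some run has length
-- exactly 4, instead of A's per-card frequency dict; same return values (alternative algorithm).

-- ===== PORT A =====
def find_four_same_cards (cards : List String) : List String :=
  cards.foldl (fun result card =>
    let counts := card.toList.foldl (fun d ch => d.insert ch (d.getD ch 0 + 1))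
      (PySem.Dict.empty : PySem.Dict Char Int)
    if counts.values.contains (4 : Int) then result ++ [card] else result) []

-- ===== PORT B =====
-- run_lengths: while s: take the maximal prefix of copies of s[0], record its length, drop it
def runLens : List Char → List Nat
  | [] => []
  | c :: rest =>
      ((rest.takeWhile (· == c)).length + 1) :: runLens (rest.dropWhile (· == c))
  termination_by s => s.length
  decreasing_by
    exact Nat.lt_succ_of_le (List.Sublist.length_le (List.dropWhile_sublist _))

def find_four_same_cards_alt (cards : List String) : List String :=
  cards.filter (fun card =>
    (runLens (PySem.List.sorted card.toList (fun x => x) false)).contains 4)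

-- ===== PRECONDITION & SPEC =====
def Spec_find_four_same_cards (cards : List String) (out : List String) : Prop := out = find_four_same_cards_alt cards
instance (cards : List String) (out : List String) : Decidable (Spec_find_four_same_cards cards out) := by unfold Spec_find_four_same_cards; infer_instance

-- ===== CLAIM (what is proved, stated in full; the proofs are below) =====
def Claim_equal_find_four_same_cards : Prop := ∀ (cards : List String), Dom_find_four_same_cards cards → Spec_find_four_same_cards cards (find_four_same_cards cards)

-- ===== LEMMAS AND PROOFS =====

-- on a (≤)-sorted list, the run lengths are exactly the multiplicities of its elements
lemma mem_runLens_iff (s : List Char) (hs : s.Pairwise (· ≤ ·)) (n : Nat) :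
    n ∈ runLens s ↔ ∃ c ∈ s, s.count c = n := by
  induction s using runLens.induct with
  | case1 =>
      simp [runLens]
  | case2 c rest ih =>
      have hrest : rest.Pairwise (· ≤ ·) := (List.pairwise_cons.mp hs).2
      have hle : ∀ x ∈ rest, c ≤ x := (List.pairwise_cons.mp hs).1
      set t := rest.takeWhile (· == c) with ht
      set d := rest.dropWhile (· == c) with hd
      have hsplit : rest = t ++ d := (List.takeWhile_append_dropWhile).symm
      have hteq : ∀ x ∈ t, x = c := fun x hx => by
        simpa using List.mem_takeWhile_imp hx
      have hd_pw : d.Pairwise (· ≤ ·) := List.Pairwise.sublist (List.dropWhile_sublist _) hrest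
      -- c is not in d
      have hcd : c ∉ d := by
        intro hcmem
        cases hdd : d with
        | nil => simp [hdd] at hcmem
        | cons h d' =>
          have hh : ¬ (h == c) = true := by
            have := List.head?_dropWhile_not (· == c) rest
            rw [← hd, hdd] at this; simpa using this
          have hhc : h ≠ c := by simpa using hh
          have hhmem : h ∈ rest := by
            rw [hsplit, hdd]; simp
          have hch : c ≤ h := hle h hhmem
          have hclt : c < h := lt_of_le_of_ne hch (Ne.symm hhc)
          rw [hdd] at hcmem
          rcases List.mem_cons.mp hcmem with h1 | h2
          · exact hhc h1.symm
          · have : h ≤ c := by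
              have := List.pairwise_cons.mp (hdd ▸ hd_pw)
              exact this.1 c h2
            exact absurd (lt_of_lt_of_le hclt this) (lt_irrefl c)
      -- counts
      have hcount_c : (c :: rest).count c = t.length + 1 := by
        rw [hsplit]
        simp [List.count_append, List.count_eq_zero.mpr hcd,
          List.count_eq_length.mpr (fun b hb => (hteq b hb).symm)]
      have hcount_ne : ∀ ch, ch ≠ c → (c :: rest).count ch = d.count ch := by
        intro ch hne
        rw [hsplit]
        simp [List.count_append, Ne.symm hne,
          List.count_eq_zero.mpr (fun hmem => hne (hteq ch hmem))]
      rw [show runLens (c :: rest) = (t.length + 1) :: runLens d from by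
        rw [runLens]]
      simp only [List.mem_cons]
      rw [ih hd_pw]
      constructor
      · rintro (h1 | h2)
        · exact ⟨c, Or.inl rfl, by rw [hcount_c, h1]⟩
        · obtain ⟨ch, hmem, hcnt⟩ := h2
          have hne : ch ≠ c := fun h => hcd (h ▸ hmem)
          refine ⟨ch, Or.inr (hsplit ▸ List.mem_append_right t hmem), ?_⟩
          rw [hcount_ne ch hne, hcnt]
      · rintro ⟨ch, hmem, hcnt⟩
        by_cases hne : ch = c
        · left; rw [hne, hcount_c] at hcnt; omega
        · right
          refine ⟨ch, ?_, ?_⟩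
          · rcases hmem with h1 | h2
            · exact absurd h1 hne
            · rcases List.mem_append.mp (hsplit ▸ h2) with h3 | h4
              · exact absurd (hteq ch h3) hne
              · exact h4
          · rw [← hcount_ne ch hne, hcnt]

-- per-card: A's dict-values test equals B's run-length test on the sorted card
lemma per_card (l : List Char) :
    ((l.foldl (fun d ch => d.insert ch (d.getD ch 0 + 1))
        (PySem.Dict.empty : PySem.Dict Char Int)).values).contains (4 : Int)
      = (runLens (PySem.List.sorted l (fun x => x) false)).contains 4 := by
  rw [PySem.Dict.foldl_insert_getD_add_one_eq_counter]
  rw [Bool.eq_iff_iff]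
  simp only [PySem.Dict.values, PySem.Dict.items_counter, List.map_map,
    List.contains_iff_mem, List.mem_map, Function.comp, PySem.Set.mem_ofList]
  rw [mem_runLens_iff _ (by simpa using PySem.List.sorted_pairwise l (fun x => x)) 4]
  constructor
  · rintro ⟨k, hk, hv⟩
    refine ⟨k, (PySem.List.mem_sorted _ _ _ _).mpr hk, ?_⟩
    rw [(PySem.List.sorted_perm l (fun x => x) false).count_eq]
    exact_mod_cast hv
  · rintro ⟨k, hk, hv⟩
    rw [(PySem.List.sorted_perm l (fun x => x) false).count_eq] at hv
    exact ⟨k, (PySem.List.mem_sorted _ _ _ _).mp hk, by exact_mod_cast hv⟩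

-- ===== VERDICT (by name: the statement is the Claim_ definition above) =====
theorem find_four_same_cards_spec : Claim_equal_find_four_same_cards := by
  intro cards _
  unfold Spec_find_four_same_cards find_four_same_cards find_four_same_cards_alt
  simp only [per_card]
  rw [PySem.List.foldl_append_if_eq_filter]
  simp
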